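-- pv_equiv track=rewrite | github.com/luhao2013/Algorithms | offer/67.机器人的运动范围.py | is_move
-- ===== SOURCE A (Python) =====
-- def is_move(rows, cols, threshold):
--     count = 0
--     while rows:
--         count += rows % 10
--         rows //= 10
--     while cols:
--         count += cols % 10
--         cols //= 10
--     return False if count > threshold else True
-- ===== SOURCE B (Python) =====
-- def is_move(rows, cols, threshold):
--     count = sum(int(c) for c in str(rows)) + sum(int(c) for c in str(cols))
--     return count <= threshold
-- ===== Notes on version B (the rewrite author's own statement) =====
-- stated objective: idiomatic
-- what changed: Replaces the two arithmetic while-loops (%10 and //=10) by summing the digit characters of str(rows) and str(cols), with a direct boolean comparison instead of the False/True conditional.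
import Mathlib
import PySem

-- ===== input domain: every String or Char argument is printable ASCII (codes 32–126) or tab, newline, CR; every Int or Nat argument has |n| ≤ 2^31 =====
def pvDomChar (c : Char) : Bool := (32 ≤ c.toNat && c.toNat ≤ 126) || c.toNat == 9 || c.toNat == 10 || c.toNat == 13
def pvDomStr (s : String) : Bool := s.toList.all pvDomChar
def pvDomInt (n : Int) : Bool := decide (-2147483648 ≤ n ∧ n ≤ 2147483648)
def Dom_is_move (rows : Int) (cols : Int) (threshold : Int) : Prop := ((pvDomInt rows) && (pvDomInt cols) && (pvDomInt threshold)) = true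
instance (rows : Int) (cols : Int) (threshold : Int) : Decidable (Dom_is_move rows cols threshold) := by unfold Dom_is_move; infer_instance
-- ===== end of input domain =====

-- B sums the digit characters of str(rows)/str(cols) instead of A's two %10-//10 while-loops;
-- Pre_ restricts to nonnegative rows and cols, on negatives A's while-loop never terminates (//=10 stalls at -1).
-- ===== PORT A =====
-- A's while loop 'while n: count += n % 10; n //= 10'. For n ≥ 0 (the only inputs where
-- the Python loop terminates, guaranteed by Pre_) Python's % and // agree with Nat's, so the
-- loop is transcribed as structural recursion on the Nat value; negatives (outside Pre_) are clamped.
def pyDigitLoop (n : Nat) (count : Int) : Int :=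
  if n = 0 then count else pyDigitLoop (n / 10) (count + (n % 10 : Nat))
decreasing_by exact Nat.div_lt_self (Nat.pos_of_ne_zero (by assumption)) (by norm_num)

def is_move (rows : Int) (cols : Int) (threshold : Int) : Bool :=
  -- count = 0; while rows: …; while cols: …; return False if count > threshold else True
  if pyDigitLoop cols.toNat (pyDigitLoop rows.toNat 0) > threshold then false else true

-- ===== PORT B =====
-- int(c) for a single character is ported as c.toNat - 48, exact on digit characters
-- (all characters of str(n) for n ≥ 0, i.e. inside Pre_).
def is_move_alt (rows : Int) (cols : Int) (threshold : Int) : Bool :=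
  decide (((PySem.Int.toStr rows).toList.map (fun c => (c.toNat : Int) - 48)).sum
        + ((PySem.Int.toStr cols).toList.map (fun c => (c.toNat : Int) - 48)).sum ≤ threshold)

-- ===== PRECONDITION & SPEC =====
-- Pre_ excludes negative rows or cols: there A's while-loop never terminates (n //= 10 stalls at -1),
-- so A returns on exactly the inputs Pre_ admits.
def Pre_is_move (rows : Int) (cols : Int) (threshold : Int) : Prop := 0 ≤ rows ∧ 0 ≤ cols
instance (rows : Int) (cols : Int) (threshold : Int) : Decidable (Pre_is_move rows cols threshold) := by unfold Pre_is_move; infer_instance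
def pvWitness_is_move : Int × Int × Int := (35, 37, 18)

def Spec_is_move (rows : Int) (cols : Int) (threshold : Int) (out : Bool) : Prop := out = is_move_alt rows cols threshold
instance (rows : Int) (cols : Int) (threshold : Int) (out : Bool) : Decidable (Spec_is_move rows cols threshold out) := by unfold Spec_is_move; infer_instance

-- ===== CLAIM (what is proved, stated in full; the proofs are below) =====
def Claim_equal_is_move : Prop := ∀ (rows : Int) (cols : Int) (threshold : Int), Dom_is_move rows cols threshold → Pre_is_move rows cols threshold → Spec_is_move rows cols threshold (is_move rows cols threshold)

-- ===== LEMMAS AND PROOFS =====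

-- the digit sum A's loop computes, without accumulator
def dsum (n : Nat) : Int :=
  if n = 0 then 0 else (n % 10 : Nat) + dsum (n / 10)
decreasing_by exact Nat.div_lt_self (Nat.pos_of_ne_zero (by assumption)) (by norm_num)

theorem dsum_zero : dsum 0 = 0 := by rw [dsum]; norm_num

theorem dsum_ne (n : Nat) (h : n ≠ 0) : dsum n = (n % 10 : Nat) + dsum (n / 10) := by
  conv_lhs => rw [dsum]
  rw [if_neg h]

theorem pyDigitLoop_eq (n : Nat) : ∀ c : Int, pyDigitLoop n c = c + dsum n := by
  induction n using Nat.strong_induction_on with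
  | _ n ih =>
    intro c
    rw [pyDigitLoop]
    by_cases h : n = 0
    · rw [if_pos h, h, dsum_zero]; ring
    · rw [if_neg h, ih (n / 10) (Nat.div_lt_self (Nat.pos_of_ne_zero h) (by norm_num)),
          dsum_ne n h]
      ring

theorem digitChar_toNat (d : Nat) (h : d < 10) : (Nat.digitChar d).toNat = 48 + d := by
  interval_cases d <;> rfl

theorem toDigitsCore_sum (fuel : Nat) : ∀ (n : Nat) (l : List Char), n < fuel →
    ((Nat.toDigitsCore 10 fuel n l).map (fun c => (c.toNat : Int) - 48)).sum
      = dsum n + ((l.map (fun c => (c.toNat : Int) - 48)).sum) := by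
  induction fuel with
  | zero => intro n l h; omega
  | succ fuel ih =>
    intro n l h
    rw [Nat.toDigitsCore]
    have hlt : n % 10 < 10 := Nat.mod_lt _ (by norm_num)
    by_cases h10 : n / 10 = 0
    · simp only [h10, if_true]
      rw [List.map_cons, List.sum_cons, digitChar_toNat _ hlt]
      have hd : dsum n = ((n % 10 : Nat) : Int) := by
        by_cases h0 : n = 0
        · rw [h0, dsum_zero]; norm_num
        · rw [dsum_ne n h0, h10, dsum_zero]; ring
      rw [hd]; push_cast; ring
    · simp only [if_neg h10]
      have hn : n ≠ 0 := by intro h0; exact h10 (by simp [h0])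
      have hfuel : n / 10 < fuel := by
        have := Nat.div_lt_self (Nat.pos_of_ne_zero hn) (show 1 < 10 by norm_num)
        omega
      rw [ih (n / 10) _ hfuel, dsum_ne n hn]
      simp only [List.map_cons, List.sum_cons, digitChar_toNat _ hlt]
      push_cast
      ring

theorem toChars_sum (n : Int) (h : 0 ≤ n) :
    ((PySem.Int.toChars n).map (fun c => (c.toNat : Int) - 48)).sum = dsum n.toNat := by
  rw [PySem.Int.toChars, if_neg (by omega), Nat.toDigits,
      toDigitsCore_sum (n.toNat + 1) n.toNat [] (Nat.lt_succ_self _)]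
  simp

-- ===== VERDICT (by name: the statement is the Claim_ definition above) =====
theorem is_move_spec : Claim_equal_is_move := by
  intro rows cols threshold _ hpre
  unfold Spec_is_move is_move is_move_alt
  rw [PySem.Int.toList_toStr, PySem.Int.toList_toStr,
      toChars_sum rows hpre.1, toChars_sum cols hpre.2,
      pyDigitLoop_eq, pyDigitLoop_eq, zero_add]
  by_cases h : dsum rows.toNat + dsum cols.toNat ≤ threshold
  · rw [if_neg (by omega), decide_eq_true h]
  · rw [if_pos (by omega), decide_eq_false h]
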